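-- pv_equiv track=rewrite | github.com/A-Knee09/Network-Analysis-Tool | components.py | _classify_interfaces
-- ===== SOURCE A (Python) =====
-- def _classify_interfaces(interfaces):
--     """Classify interfaces into types based on name patterns."""
--     types = {
--         "Ethernet": [],
--         "WiFi": [],
--         "Virtual": [],
--         "Loopback": [],
--         "Other": []
--     }
--
--     for iface, ip in interfaces:
--         iface_lower = iface.lower()
--         if "loop" in iface_lower or "lo" == iface_lower:
--             types["Loopback"].append((iface, ip))
--         elif "eth" in iface_lower or "ens" in iface_lower or "enp" in iface_lower:
--             types["Ethernet"].append((iface, ip))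
--         elif "wlan" in iface_lower or "wifi" in iface_lower or "wl" in iface_lower:
--             types["WiFi"].append((iface, ip))
--         elif "virt" in iface_lower or "vbox" in iface_lower or "vmnet" in iface_lower or "docker" in iface_lower:
--             types["Virtual"].append((iface, ip))
--         else:
--             types["Other"].append((iface, ip))
--
--     return {k: v for k, v in types.items() if v}
-- ===== SOURCE B (Python) =====
-- _RULES = [
--     ("Loopback", lambda s: "loop" in s or s == "lo"),
--     ("Ethernet", lambda s: any(k in s for k in ("eth", "ens", "enp"))),
--     ("WiFi",     lambda s: any(k in s for k in ("wlan", "wifi", "wl"))),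
--     ("Virtual",  lambda s: any(k in s for k in ("virt", "vbox", "vmnet", "docker"))),
-- ]
--
-- _ORDER = ("Ethernet", "WiFi", "Virtual", "Loopback", "Other")
--
--
-- def _category(name):
--     s = name.lower()
--     return next((cat for cat, pred in _RULES if pred(s)), "Other")
--
--
-- def _classify_interfaces(interfaces):
--     buckets = {k: [p for p in interfaces if _category(p[0]) == k] for k in _ORDER}
--     return {k: v for k, v in buckets.items() if v}
-- ===== Notes on version B (the rewrite author's own statement) =====
-- stated objective: idiomatic
-- what changed: A does one pass with a five-way if/elif chain appending into mutable buckets; B factors the classification into an ordered rule table with a first-match lookup and builds each bucket declaratively as a filter of the input per category.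
import Mathlib
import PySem

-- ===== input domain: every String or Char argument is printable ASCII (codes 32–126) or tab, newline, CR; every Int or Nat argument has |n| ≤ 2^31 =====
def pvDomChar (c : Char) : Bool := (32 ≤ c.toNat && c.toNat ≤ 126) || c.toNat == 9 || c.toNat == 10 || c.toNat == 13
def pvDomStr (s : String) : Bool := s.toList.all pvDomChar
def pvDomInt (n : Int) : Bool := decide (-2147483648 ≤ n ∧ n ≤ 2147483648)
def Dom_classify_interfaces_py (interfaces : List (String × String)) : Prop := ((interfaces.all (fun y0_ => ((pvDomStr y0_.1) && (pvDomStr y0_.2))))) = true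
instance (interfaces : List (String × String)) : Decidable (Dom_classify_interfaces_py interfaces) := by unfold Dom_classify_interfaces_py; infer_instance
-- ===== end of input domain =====

-- B replaces A's single-pass five-way if/elif chain over mutable buckets by an ordered rule
-- table with a first-match category lookup and per-category filters (idiomatic; same cost).


-- ===== PORT A =====
-- one loop over interfaces, if/elif chain appending into the bucket dict
def pyClassifyStep (d : PySem.Dict String (List (String × String))) (p : String × String) : PySem.Dict String (List (String × String)) :=
  let iface := p.1
  let ip := p.2
  let il := PySem.Str.lower iface
  if PySem.Str.isIn "loop" il || il == "lo" then
    d.modify "Loopback" [] (· ++ [(iface, ip)])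
  else if PySem.Str.isIn "eth" il || PySem.Str.isIn "ens" il || PySem.Str.isIn "enp" il then
    d.modify "Ethernet" [] (· ++ [(iface, ip)])
  else if PySem.Str.isIn "wlan" il || PySem.Str.isIn "wifi" il || PySem.Str.isIn "wl" il then
    d.modify "WiFi" [] (· ++ [(iface, ip)])
  else if PySem.Str.isIn "virt" il || PySem.Str.isIn "vbox" il || PySem.Str.isIn "vmnet" il || PySem.Str.isIn "docker" il then
    d.modify "Virtual" [] (· ++ [(iface, ip)])
  else
    d.modify "Other" [] (· ++ [(iface, ip)])

def classify_interfaces_py (interfaces : List (String × String)) : List (String × List (String × String)) :=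
  let types : PySem.Dict String (List (String × String)) :=
    ((((PySem.Dict.empty.insert "Ethernet" []).insert "WiFi" []).insert "Virtual" []).insert "Loopback" []).insert "Other" []
  let types := interfaces.foldl pyClassifyStep types
  types.items.filter (fun kv => !kv.2.isEmpty)

-- ===== PORT B =====
-- ordered rule table; first matching rule names the category, default "Other"
def pyRules : List (String × (String → Bool)) :=
  [("Loopback", fun s => PySem.Str.isIn "loop" s || s == "lo"),
   ("Ethernet", fun s => PySem.Str.isIn "eth" s || PySem.Str.isIn "ens" s || PySem.Str.isIn "enp" s),
   ("WiFi",     fun s => PySem.Str.isIn "wlan" s || PySem.Str.isIn "wifi" s || PySem.Str.isIn "wl" s),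
   ("Virtual",  fun s => PySem.Str.isIn "virt" s || PySem.Str.isIn "vbox" s || PySem.Str.isIn "vmnet" s || PySem.Str.isIn "docker" s)]

def pyCategory (name : String) : String :=
  let s := PySem.Str.lower name
  ((pyRules.find? (fun r => r.2 s)).map (·.1)).getD "Other"

def pyOrder : List String := ["Ethernet", "WiFi", "Virtual", "Loopback", "Other"]

def classify_interfaces_py_alt (interfaces : List (String × String)) : List (String × List (String × String)) :=
  let buckets := pyOrder.map (fun k => (k, interfaces.filter (fun p => pyCategory p.1 == k)))
  buckets.filter (fun kv => !kv.2.isEmpty)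

-- ===== PRECONDITION & SPEC =====
def Spec_classify_interfaces_py (interfaces : List (String × String)) (out : List (String × List (String × String))) : Prop := out = classify_interfaces_py_alt interfaces
instance (interfaces : List (String × String)) (out : List (String × List (String × String))) : Decidable (Spec_classify_interfaces_py interfaces out) := by unfold Spec_classify_interfaces_py; infer_instance

-- ===== CLAIM (what is proved, stated in full; the proofs are below) =====
def Claim_equal_classify_interfaces_py : Prop := ∀ (interfaces : List (String × String)), Dom_classify_interfaces_py interfaces → Spec_classify_interfaces_py interfaces (classify_interfaces_py interfaces)

-- ===== LEMMAS AND PROOFS =====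

-- A's loop, started from any bucket contents, appends per bucket exactly the interfaces
-- whose B-category is that bucket's key.
lemma classify_fold_items (xs : List (String × String))
    (e w v l o : List (String × String)) :
    xs.foldl pyClassifyStep (PySem.Dict.mk [("Ethernet", e), ("WiFi", w), ("Virtual", v), ("Loopback", l), ("Other", o)]) =
    PySem.Dict.mk [("Ethernet", e ++ xs.filter (fun p => pyCategory p.1 == "Ethernet")),
      ("WiFi", w ++ xs.filter (fun p => pyCategory p.1 == "WiFi")),
      ("Virtual", v ++ xs.filter (fun p => pyCategory p.1 == "Virtual")),
      ("Loopback", l ++ xs.filter (fun p => pyCategory p.1 == "Loopback")),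
      ("Other", o ++ xs.filter (fun p => pyCategory p.1 == "Other"))] := by
  induction xs generalizing e w v l o with
  | nil => simp
  | cons p xs ih =>
    simp only [List.foldl_cons, pyClassifyStep]
    split_ifs with h1 h2 h3 h4
    · have hc : pyCategory p.1 = "Loopback" := by
        simp only [pyCategory, pyRules]
        rw [List.find?_cons_of_pos (by exact h1)]
        rfl
      have hstep : (PySem.Dict.mk [("Ethernet", e), ("WiFi", w), ("Virtual", v), ("Loopback", l), ("Other", o)]).modify "Loopback" [] (· ++ [(p.1, p.2)]) =
          PySem.Dict.mk [("Ethernet", e), ("WiFi", w), ("Virtual", v), ("Loopback", l ++ [(p.1, p.2)]), ("Other", o)] := by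
        simp [PySem.Dict.modify, PySem.Dict.insert, PySem.Dict.contains, PySem.Dict.getD, PySem.Dict.get?, List.find?]
      rw [hstep, ih]
      simp [hc]
    · have hc : pyCategory p.1 = "Ethernet" := by
        simp only [pyCategory, pyRules]
        rw [List.find?_cons_of_neg (by simpa using h1), List.find?_cons_of_pos (by exact h2)]
        rfl
      have hstep : (PySem.Dict.mk [("Ethernet", e), ("WiFi", w), ("Virtual", v), ("Loopback", l), ("Other", o)]).modify "Ethernet" [] (· ++ [(p.1, p.2)]) =
          PySem.Dict.mk [("Ethernet", e ++ [(p.1, p.2)]), ("WiFi", w), ("Virtual", v), ("Loopback", l), ("Other", o)] := by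
        simp [PySem.Dict.modify, PySem.Dict.insert, PySem.Dict.contains, PySem.Dict.getD, PySem.Dict.get?, List.find?]
      rw [hstep, ih]
      simp [hc]
    · have hc : pyCategory p.1 = "WiFi" := by
        simp only [pyCategory, pyRules]
        rw [List.find?_cons_of_neg (by simpa using h1), List.find?_cons_of_neg (by simpa using h2), List.find?_cons_of_pos (by exact h3)]
        rfl
      have hstep : (PySem.Dict.mk [("Ethernet", e), ("WiFi", w), ("Virtual", v), ("Loopback", l), ("Other", o)]).modify "WiFi" [] (· ++ [(p.1, p.2)]) =
          PySem.Dict.mk [("Ethernet", e), ("WiFi", w ++ [(p.1, p.2)]), ("Virtual", v), ("Loopback", l), ("Other", o)] := by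
        simp [PySem.Dict.modify, PySem.Dict.insert, PySem.Dict.contains, PySem.Dict.getD, PySem.Dict.get?, List.find?]
      rw [hstep, ih]
      simp [hc]
    · have hc : pyCategory p.1 = "Virtual" := by
        simp only [pyCategory, pyRules]
        rw [List.find?_cons_of_neg (by simpa using h1), List.find?_cons_of_neg (by simpa using h2), List.find?_cons_of_neg (by simpa using h3), List.find?_cons_of_pos (by exact h4)]
        rfl
      have hstep : (PySem.Dict.mk [("Ethernet", e), ("WiFi", w), ("Virtual", v), ("Loopback", l), ("Other", o)]).modify "Virtual" [] (· ++ [(p.1, p.2)]) =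
          PySem.Dict.mk [("Ethernet", e), ("WiFi", w), ("Virtual", v ++ [(p.1, p.2)]), ("Loopback", l), ("Other", o)] := by
        simp [PySem.Dict.modify, PySem.Dict.insert, PySem.Dict.contains, PySem.Dict.getD, PySem.Dict.get?, List.find?]
      rw [hstep, ih]
      simp [hc]
    · have hc : pyCategory p.1 = "Other" := by
        simp only [pyCategory, pyRules]
        rw [List.find?_cons_of_neg (by simpa using h1), List.find?_cons_of_neg (by simpa using h2), List.find?_cons_of_neg (by simpa using h3), List.find?_cons_of_neg (by simpa using h4)]
        rfl
      have hstep : (PySem.Dict.mk [("Ethernet", e), ("WiFi", w), ("Virtual", v), ("Loopback", l), ("Other", o)]).modify "Other" [] (· ++ [(p.1, p.2)]) =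
          PySem.Dict.mk [("Ethernet", e), ("WiFi", w), ("Virtual", v), ("Loopback", l), ("Other", o ++ [(p.1, p.2)])] := by
        simp [PySem.Dict.modify, PySem.Dict.insert, PySem.Dict.contains, PySem.Dict.getD, PySem.Dict.get?, List.find?]
      rw [hstep, ih]
      simp [hc]

-- ===== VERDICT (by name: the statement is the Claim_ definition above) =====
theorem classify_interfaces_py_spec : Claim_equal_classify_interfaces_py := by
  intro interfaces _
  unfold Spec_classify_interfaces_py
  have hinit : ((((PySem.Dict.empty.insert "Ethernet" ([] : List (String × String))).insert "WiFi" []).insert "Virtual" []).insert "Loopback" []).insert "Other" [] =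
      PySem.Dict.mk [("Ethernet", []), ("WiFi", []), ("Virtual", []), ("Loopback", []), ("Other", [])] := by
    decide
  simp only [classify_interfaces_py, classify_interfaces_py_alt, hinit, classify_fold_items,
    List.nil_append, pyOrder, List.map, List.filter]
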